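-- pv_equiv track=rewrite | github.com/Bindles/leetcode | __aacontest/today/4.py | stringIndices
-- ===== SOURCE A (Python) =====
-- def stringIndices(wordsContainer, wordsQuery):
--     # Helper function to find the longest common suffix between two strings
--     def longest_common_suffix(str1, str2):
--         i = 0
--         while i < min(len(str1), len(str2)) and str1[-1 - i] == str2[-1 - i]:
--             i += 1
--         return str1[-i:]
--
--     # Create a dictionary to store indices of words based on their suffixes
--     suffix_indices = {}
--     for i, word in enumerate(wordsContainer):
--         suffix = word[::-1]  # Reversed word as suffix
--         if suffix not in suffix_indices:
--             suffix_indices[suffix] = i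
--
--     ans = []
--     for query in wordsQuery:
--         max_suffix = ""
--         max_index = -1
--         for suffix in suffix_indices.keys():
--             if query.endswith(suffix[::-1]):  # Reversed back the suffix for matching
--                 if len(suffix) > len(max_suffix) or (len(suffix) == len(max_suffix) and suffix_indices[suffix] < max_index):
--                     max_suffix = suffix
--                     max_index = suffix_indices[suffix]
--         ans.append(max_index)
--
--     return ans
-- ===== SOURCE B (Python) =====
-- def stringIndices(wordsContainer, wordsQuery):
--     # first index of each distinct nonempty container word
--     first = {}
--     for i, w in enumerate(wordsContainer):
--         if w and w not in first:
--             first[w] = i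
--     ans = []
--     for q in wordsQuery:
--         r = -1
--         for k in range(len(q)):  # suffixes of q, longest first
--             j = first.get(q[k:])
--             if j is not None:
--                 r = j
--                 break
--         ans.append(r)
--     return ans
-- ===== Notes on version B (the rewrite author's own statement) =====
-- stated objective: faster
-- what changed: A scans every distinct reversed container word for each query; B builds a dict of first indices of the nonempty container words once and, per query, probes its own suffixes longest-first, stopping at the first hit.
import Mathlib
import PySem

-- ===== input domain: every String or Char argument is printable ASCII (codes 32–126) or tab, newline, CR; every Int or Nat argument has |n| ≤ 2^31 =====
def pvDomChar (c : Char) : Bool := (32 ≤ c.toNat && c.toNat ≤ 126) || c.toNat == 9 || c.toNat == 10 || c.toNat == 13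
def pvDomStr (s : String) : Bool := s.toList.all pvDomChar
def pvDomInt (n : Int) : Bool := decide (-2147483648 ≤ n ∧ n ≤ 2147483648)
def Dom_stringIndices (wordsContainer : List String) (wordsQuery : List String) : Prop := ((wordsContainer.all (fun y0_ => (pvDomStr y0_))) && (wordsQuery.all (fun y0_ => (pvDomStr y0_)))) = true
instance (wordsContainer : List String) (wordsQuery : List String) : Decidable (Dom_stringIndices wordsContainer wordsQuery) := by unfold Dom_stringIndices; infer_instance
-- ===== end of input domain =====

-- B replaces A's per-query scan over ALL dictionary keys by a scan over the query's own
-- suffixes (longest first) against a dict of container words — asymptotically fewer lookups.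


-- ===== PORT A =====
-- (A's local helper longest_common_suffix is defined but never called in A; it is omitted.)
-- w[::-1]: a step -1 slice never raises (step ≠ 0), so the getD is never the default
def pyRevA (s : String) : String := (PySem.Str.slice? s none none (-1)).getD ""

-- the dict-building loop 'for i, word in enumerate(wordsContainer): …'
def suffixIndicesA (wordsContainer : List String) : PySem.Dict String Int :=
  (PySem.List.enumerate wordsContainer).foldl
    (fun d p =>
      let suffix := pyRevA p.2
      if d.contains suffix = false then d.insert suffix p.1 else d)
    PySem.Dict.empty

-- body of the inner 'for suffix in suffix_indices.keys(): …' loop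
-- (suffix_indices[suffix]: the key is always present when read, so getD's default is never used)
def innerStepA (d : PySem.Dict String Int) (query : String) (st : String × Int) (suffix : String) : String × Int :=
  if PySem.Str.endswith query (pyRevA suffix) then
    if PySem.Str.len suffix > PySem.Str.len st.1 ∨
       (PySem.Str.len suffix = PySem.Str.len st.1 ∧ d.getD suffix 0 < st.2) then
      (suffix, d.getD suffix 0)
    else st
  else st

-- one query: max_suffix = "", max_index = -1, then the loop over the keys
def innerA (d : PySem.Dict String Int) (query : String) : String × Int :=
  d.keys.foldl (innerStepA d query) ("", -1)

def stringIndices (wordsContainer : List String) (wordsQuery : List String) : List Int :=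
  let suffix_indices := suffixIndicesA wordsContainer
  wordsQuery.foldl (fun ans query => ans ++ [(innerA suffix_indices query).2]) []

-- ===== PORT B =====
-- first index of each distinct nonempty container word ('if w and w not in first: first[w] = i')
def firstIndexDict (wordsContainer : List String) : PySem.Dict String Int :=
  (PySem.List.enumerate wordsContainer).foldl
    (fun d p => if p.2 ≠ "" ∧ d.contains p.2 = false then d.insert p.2 p.1 else d)
    PySem.Dict.empty

-- 'for k in range(len(q)): j = first.get(q[k:]); if j is not None: r = j; break'
def suffixScan (first : PySem.Dict String Int) (q : String) (k : Nat) : Int :=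
  if h : k < q.toList.length then
    match first.get? (PySem.Str.slice q (some (k : Int))) with
    | some j => j
    | none => suffixScan first q (k + 1)
  else -1
termination_by q.toList.length - k
decreasing_by omega

def stringIndices_alt (wordsContainer : List String) (wordsQuery : List String) : List Int :=
  let first := firstIndexDict wordsContainer
  wordsQuery.foldl (fun ans q => ans ++ [suffixScan first q 0]) []

-- ===== PRECONDITION & SPEC =====
def Spec_stringIndices (wordsContainer : List String) (wordsQuery : List String) (out : List Int) : Prop := out = stringIndices_alt wordsContainer wordsQuery
instance (wordsContainer : List String) (wordsQuery : List String) (out : List Int) : Decidable (Spec_stringIndices wordsContainer wordsQuery out) := by unfold Spec_stringIndices; infer_instance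

-- ===== CLAIM (what is proved, stated in full; the proofs are below) =====
def Claim_equal_stringIndices : Prop := ∀ (wordsContainer : List String) (wordsQuery : List String), Dom_stringIndices wordsContainer wordsQuery → Spec_stringIndices wordsContainer wordsQuery (stringIndices wordsContainer wordsQuery)

-- ===== LEMMAS AND PROOFS =====

lemma pyRevA_toList (s : String) : (pyRevA s).toList = s.toList.reverse := by
  simp [pyRevA, PySem.Str.slice?_none_none_neg_one, String.toList_ofList]

lemma str_toList_inj {a b : String} (h : a.toList = b.toList) : a = b :=
  String.toList_inj.mp h

lemma pyRevA_pyRevA (s : String) : pyRevA (pyRevA s) = s := by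
  apply str_toList_inj; simp [pyRevA_toList]

lemma pyRevA_ne_empty {s : String} (h : s ≠ "") : pyRevA s ≠ "" := by
  intro hc
  have := congrArg String.toList hc
  simp [pyRevA_toList, String.toList_eq_nil_iff] at this
  exact h this

lemma pyRevA_inj {a b : String} (h : pyRevA a = pyRevA b) : a = b := by
  have := congrArg String.toList h
  simp [pyRevA_toList] at this
  exact str_toList_inj this

-- abbreviation for the enumerated container
def enumC (wc : List String) : List (Int × String) := PySem.List.enumerate wc

lemma enum_nonneg {α : Type} : ∀ (xs : List α) (n : Int), ∀ p ∈ PySem.List.enumerate xs n, n ≤ p.1 := by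
  intro xs
  induction xs with
  | nil => intro n p hp; simp [PySem.List.enumerate] at hp
  | cons x t ih =>
    intro n p hp
    simp only [PySem.List.enumerate, List.mem_cons] at hp
    rcases hp with rfl | hp
    · simp
    · have := ih (n + 1) p hp; omega

-- A's dict lookup, characterised by a first-match scan of the enumerated container
lemma getA_fold (l : List (Int × String)) (d : PySem.Dict String Int) (s : String) :
    (l.foldl (fun d p =>
        let suffix := pyRevA p.2
        if d.contains suffix = false then d.insert suffix p.1 else d) d).get? s
    = (d.get? s).or ((l.find? (fun p => pyRevA p.2 == s)).map (·.1)) := by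
  induction l generalizing d with
  | nil => simp
  | cons p t ih =>
    simp only [List.foldl_cons]
    by_cases he : s = pyRevA p.2
    · cases hc : d.contains (pyRevA p.2) with
      | false =>
        rw [if_pos rfl] at *
        rw [ih]
        have h1 : (d.insert (pyRevA p.2) p.1).get? s = some p.1 := by
          rw [he]; exact PySem.Dict.get?_insert_self d (pyRevA p.2) p.1
        have h2 : d.get? s = none := by
          rw [he]; exact (PySem.Dict.get?_eq_none_iff_contains d _).mpr hc
        rw [h1, h2, List.find?_cons_of_pos (by simp [he]), Option.map_some, Option.some_or,
          Option.none_or]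
      | true =>
        rw [if_neg (by simp)]
        rw [ih]
        have h2 : (d.get? s).isSome := by
          rw [he, ← PySem.Dict.contains_eq_isSome_get?, hc]
        obtain ⟨v, hv⟩ := Option.isSome_iff_exists.mp h2
        rw [hv, Option.some_or, Option.some_or]
    · have hpred : (pyRevA p.2 == s) = false := by
        simp only [beq_eq_false_iff_ne]; exact fun hc => he hc.symm
      rw [List.find?_cons_of_neg (by simp [hpred])]
      cases hc : d.contains (pyRevA p.2) with
      | false =>
        rw [if_pos rfl, ih, PySem.Dict.get?_insert_of_ne _ _ he]
      | true =>
        rw [if_neg (by simp), ih]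

lemma getA (wc : List String) (s : String) :
    (suffixIndicesA wc).get? s = ((enumC wc).find? (fun p => pyRevA p.2 == s)).map (·.1) := by
  rw [suffixIndicesA, getA_fold, PySem.Dict.get?_empty, Option.none_or]; rfl

-- B's dict lookup, characterised the same way (empty key absent)
lemma getB_fold (l : List (Int × String)) (d : PySem.Dict String Int) (s : String) :
    (l.foldl (fun d p => if p.2 ≠ "" ∧ d.contains p.2 = false then d.insert p.2 p.1 else d) d).get? s
    = if s = "" then d.get? s
      else (d.get? s).or ((l.find? (fun p => p.2 == s)).map (·.1)) := by
  induction l generalizing d with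
  | nil => by_cases hs : s = "" <;> simp [hs]
  | cons p t ih =>
    simp only [List.foldl_cons]
    by_cases hp : p.2 = ""
    · rw [if_neg (by simp [hp]), ih]
      by_cases hs : s = ""
      · rw [if_pos hs, if_pos hs]
      · rw [if_neg hs, if_neg hs, List.find?_cons_of_neg (by simp [hp, Ne.symm hs])]
    · by_cases he : s = p.2
      · cases hc : d.contains p.2 with
        | false =>
          rw [if_pos ⟨hp, rfl⟩, ih, if_neg (he ▸ hp), if_neg (he ▸ hp)]
          have h1 : (d.insert p.2 p.1).get? s = some p.1 := by
            rw [he]; exact PySem.Dict.get?_insert_self d p.2 p.1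
          have h2 : d.get? s = none := by
            rw [he]; exact (PySem.Dict.get?_eq_none_iff_contains d _).mpr hc
          rw [h1, h2, List.find?_cons_of_pos (by simp [he]), Option.map_some, Option.some_or,
            Option.none_or]
        | true =>
          rw [if_neg (by simp), ih, if_neg (he ▸ hp), if_neg (he ▸ hp)]
          have h2 : (d.get? s).isSome := by
            rw [he, ← PySem.Dict.contains_eq_isSome_get?, hc]
          obtain ⟨v, hv⟩ := Option.isSome_iff_exists.mp h2
          rw [hv, Option.some_or, Option.some_or]
      · have hpred : (p.2 == s) = false := by
          simp only [beq_eq_false_iff_ne]; exact fun hc => he hc.symm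
        by_cases hs : s = ""
        · cases hc : d.contains p.2 with
          | false =>
            rw [if_pos ⟨hp, rfl⟩, ih, if_pos hs,
              PySem.Dict.get?_insert_of_ne _ _ he, if_pos hs]
          | true => rw [if_neg (by simp), ih, if_pos hs, if_pos hs]
        · rw [List.find?_cons_of_neg (by simp [hpred])]
          cases hc : d.contains p.2 with
          | false =>
            rw [if_pos ⟨hp, rfl⟩, ih, if_neg hs, if_neg hs,
              PySem.Dict.get?_insert_of_ne _ _ he]
          | true => rw [if_neg (by simp), ih, if_neg hs]

lemma getB (wc : List String) (s : String) :
    (firstIndexDict wc).get? s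
    = if s = "" then none else ((enumC wc).find? (fun p => p.2 == s)).map (·.1) := by
  rw [firstIndexDict, getB_fold, PySem.Dict.get?_empty, Option.none_or]; rfl

-- the two dicts agree through reversal on nonempty keys
lemma getB_eq_getA (wc : List String) (t : String) (h : t ≠ "") :
    (firstIndexDict wc).get? t = (suffixIndicesA wc).get? (pyRevA t) := by
  rw [getB, getA, if_neg h]
  have hf : (fun p : Int × String => pyRevA p.2 == pyRevA t) = (fun p : Int × String => p.2 == t) := by
    funext p
    by_cases hpt : p.2 = t
    · simp [hpt]
    · have h2 : pyRevA p.2 ≠ pyRevA t := fun hc => hpt (pyRevA_inj hc)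
      simp [hpt, h2]
  rw [hf]

lemma getA_nonneg (wc : List String) (s : String) {v : Int}
    (h : (suffixIndicesA wc).get? s = some v) : 0 ≤ v := by
  rw [getA] at h
  obtain ⟨p, hp, hv⟩ := Option.map_eq_some_iff.mp h
  have hm := List.mem_of_find?_eq_some hp
  have := enum_nonneg wc 0 p hm
  omega

lemma getDA_nonneg (wc : List String) (s : String) : 0 ≤ (suffixIndicesA wc).getD s 0 := by
  rw [PySem.Dict.getD_eq_get?_getD]
  cases h : (suffixIndicesA wc).get? s with
  | none => simp
  | some v => simpa using getA_nonneg wc s h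

-- a "good" key of A's dict for query q: nonempty and its reversal is a suffix of q
def GoodKey (q : List Char) (s : String) : Prop := s ≠ "" ∧ s.toList.reverse <:+ q

lemma suffix_len_eq {l1 l2 q : List Char} (h1 : l1 <:+ q) (h2 : l2 <:+ q)
    (h : l1.length = l2.length) : l1 = l2 := by
  rw [List.suffix_iff_eq_drop.mp h1, List.suffix_iff_eq_drop.mp h2, h]

lemma endswith_rev (q s : String) :
    PySem.Str.endswith q (pyRevA s) = true ↔ s.toList.reverse <:+ q.toList := by
  rw [PySem.Str.endswith_eq, PySem.Chars.endswith_iff, pyRevA_toList]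

lemma len_pos_of_ne {s : String} (h : s ≠ "") : 0 < s.toList.length :=
  List.length_pos_iff.mpr (fun hnil => h (String.toList_eq_nil_iff.mp hnil))

-- invariant of A's inner fold
lemma innerA_spec (d : PySem.Dict String Int) (hnn : ∀ s, 0 ≤ d.getD s 0) (q : String)
    (K : List String) :
    (K.foldl (innerStepA d q) ("", -1) = ("", -1) ∧ ∀ s ∈ K, ¬ GoodKey q.toList s) ∨
    (GoodKey q.toList (K.foldl (innerStepA d q) ("", -1)).1 ∧
     (K.foldl (innerStepA d q) ("", -1)).1 ∈ K ∧
     (K.foldl (innerStepA d q) ("", -1)).2 = d.getD (K.foldl (innerStepA d q) ("", -1)).1 0 ∧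
     ∀ s ∈ K, GoodKey q.toList s →
       s.toList.length ≤ (K.foldl (innerStepA d q) ("", -1)).1.toList.length) := by
  induction K using List.reverseRecOn with
  | nil => left; refine ⟨rfl, fun x hx => ?_⟩; simp at hx
  | append_singleton K s ih =>
    rw [List.foldl_append, List.foldl_cons, List.foldl_nil]
    set r := K.foldl (innerStepA d q) ("", -1) with hrdef
    rcases ih with ⟨hr0, hnone⟩ | ⟨hg, hmem, hval, hmax⟩
    · rw [hr0]
      by_cases hE : PySem.Str.endswith q (pyRevA s) = true
      case neg =>
        simp only [innerStepA, hE]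
        left
        refine ⟨rfl, fun x hx => ?_⟩
        rcases List.mem_append.mp hx with hx | hx
        · exact hnone x hx
        · cases List.mem_singleton.mp hx
          exact fun hG => hE ((endswith_rev q s).mpr hG.2)
      case pos =>
        simp only [innerStepA, hE, if_true]
        by_cases hs : s = ""
        · rw [if_neg ?_]
          · left
            refine ⟨rfl, fun x hx => ?_⟩
            rcases List.mem_append.mp hx with hx | hx
            · exact hnone x hx
            · cases List.mem_singleton.mp hx; exact fun hG => hG.1 hs
          · subst hs
            have h0 := hnn ""
            simp only [PySem.Str.len_eq]
            intro hcond
            rcases hcond with h | ⟨h1, h2⟩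
            · exact lt_irrefl _ h
            · omega
        · rw [if_pos (Or.inl ?_)]
          · right
            refine ⟨⟨hs, (endswith_rev q s).mp hE⟩,
              List.mem_append_right _ (List.mem_singleton_self s), rfl, fun x hx hG => ?_⟩
            rcases List.mem_append.mp hx with hx | hx
            · exact absurd hG (hnone x hx)
            · cases List.mem_singleton.mp hx; exact le_refl _
          · simp only [PySem.Str.len_eq]
            have := len_pos_of_ne hs
            have h0 : ("" : String).toList.length = 0 := rfl
            rw [h0]
            exact_mod_cast this
    · by_cases hE : PySem.Str.endswith q (pyRevA s) = true
      case neg =>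
        simp only [innerStepA, hE]
        right
        refine ⟨hg, List.mem_append_left _ hmem, hval, fun x hx hG => ?_⟩
        rcases List.mem_append.mp hx with hx | hx
        · exact hmax x hx hG
        · cases List.mem_singleton.mp hx
          exact absurd ((endswith_rev q s).mpr hG.2) hE
      case pos =>
        simp only [innerStepA, hE, if_true]
        have hrlen := len_pos_of_ne hg.1
        by_cases hs : s = ""
        · rw [if_neg ?_]
          · right
            refine ⟨hg, List.mem_append_left _ hmem, hval, fun x hx hG => ?_⟩
            rcases List.mem_append.mp hx with hx | hx
            · exact hmax x hx hG
            · cases List.mem_singleton.mp hx; exact absurd hs hG.1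
          · subst hs
            simp only [PySem.Str.len_eq]
            have h0 : ("" : String).toList.length = 0 := rfl
            rw [h0]
            intro hcond
            rcases hcond with h | ⟨h1, h2⟩ <;> omega
        · have hGs : GoodKey q.toList s := ⟨hs, (endswith_rev q s).mp hE⟩
          rcases Nat.lt_trichotomy s.toList.length r.1.toList.length with hlt | heq | hgt
          · rw [if_neg ?_]
            · right
              refine ⟨hg, List.mem_append_left _ hmem, hval, fun x hx hG => ?_⟩
              rcases List.mem_append.mp hx with hx | hx
              · exact hmax x hx hG
              · cases List.mem_singleton.mp hx; exact le_of_lt hlt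
            · simp only [PySem.Str.len_eq]
              intro hcond
              rcases hcond with h | ⟨h1, h2⟩
              · have : r.1.toList.length < s.toList.length := by exact_mod_cast h
                omega
              · have : s.toList.length = r.1.toList.length := by exact_mod_cast h1
                omega
          · have hseq : s = r.1 := by
              apply str_toList_inj
              apply List.reverse_injective
              exact suffix_len_eq hGs.2 hg.2 (by simp [heq])
            rw [if_neg ?_]
            · right
              refine ⟨hg, List.mem_append_left _ hmem, hval, fun x hx hG => ?_⟩
              rcases List.mem_append.mp hx with hx | hx
              · exact hmax x hx hG
              · cases List.mem_singleton.mp hx; rw [hseq]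
            · simp only [PySem.Str.len_eq]
              intro hcond
              rcases hcond with h | ⟨h1, h2⟩
              · have : r.1.toList.length < s.toList.length := by exact_mod_cast h
                omega
              · rw [hseq, ← hval] at h2; exact lt_irrefl _ h2
          · rw [if_pos (Or.inl (by simp only [PySem.Str.len_eq]; exact_mod_cast hgt))]
            right
            refine ⟨hGs, List.mem_append_right _ (List.mem_singleton_self s), rfl,
              fun x hx hG => ?_⟩
            rcases List.mem_append.mp hx with hx | hx
            · exact le_trans (hmax x hx hG) (le_of_lt hgt)
            · cases List.mem_singleton.mp hx; exact le_refl _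

-- q[k:] on the list side
lemma dropS_toList (q : String) (k : Nat) :
    (PySem.Str.slice q (some (k : Int))).toList = q.toList.drop k := by
  simp [PySem.Str.toList_slice, PySem.Chars.slice_eq_listSlice,
    PySem.List.slice_from q.toList (a := (k : Int)) (by omega)]

-- the central per-query equality
lemma perQuery (wc : List String) (q : String) :
    (innerA (suffixIndicesA wc) q).2 = suffixScan (firstIndexDict wc) q 0 := by
  have hnn := getDA_nonneg wc
  rw [innerA]
  rcases innerA_spec (suffixIndicesA wc) hnn q (suffixIndicesA wc).keys with
    ⟨hr0, hnone⟩ | ⟨hg, hmem, hval, hmax⟩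
  · -- no container word is a nonempty suffix of q: every probe of B misses, B returns -1
    have key : ∀ j : Nat, (firstIndexDict wc).get? (PySem.Str.slice q (some (j : Int))) = none := by
      intro j
      set t := PySem.Str.slice q (some (j : Int)) with htdef
      by_cases ht : t = ""
      · rw [ht, getB, if_pos rfl]
      · cases hv : (firstIndexDict wc).get? t with
        | none => rfl
        | some v =>
          exfalso
          have hGood : GoodKey q.toList (pyRevA t) := by
            refine ⟨pyRevA_ne_empty ht, ?_⟩
            rw [pyRevA_toList, List.reverse_reverse, htdef, dropS_toList]
            exact List.drop_suffix _ _
          have hmemK : pyRevA t ∈ (suffixIndicesA wc).keys := by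
            rw [← PySem.Dict.contains_iff_mem_keys, PySem.Dict.contains_eq_isSome_get?,
              ← getB_eq_getA wc t ht, hv]
            rfl
          exact hnone _ hmemK hGood
    have scanNone : ∀ m k, q.toList.length - k ≤ m → suffixScan (firstIndexDict wc) q k = -1 := by
      intro m
      induction m with
      | zero => intro k hk; rw [suffixScan, dif_neg (by omega)]
      | succ m ih =>
        intro k hk
        rw [suffixScan]
        by_cases h : k < q.toList.length
        · rw [dif_pos h, key k]
          exact ih (k + 1) (by omega)
        · rw [dif_neg h]
    rw [hr0, scanNone q.toList.length 0 (by omega)]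
  · -- r.1 is the longest good key; B's scan first hits exactly at its position
    set r := (suffixIndicesA wc).keys.foldl (innerStepA (suffixIndicesA wc) q) ("", -1) with hrdef
    have hrlen := len_pos_of_ne hg.1
    have hsfx : r.1.toList.reverse <:+ q.toList := hg.2
    have hsfxlen : r.1.toList.length ≤ q.toList.length := by
      have := hsfx.length_le; simpa using this
    set kstar : Nat := q.toList.length - r.1.toList.length with hkdef
    have hkslt : kstar < q.toList.length := by omega
    have hdrop : q.toList.drop kstar = r.1.toList.reverse := by
      have := List.suffix_iff_eq_drop.mp hsfx
      simp only [List.length_reverse] at this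
      rw [hkdef]
      exact this.symm
    have hslice : PySem.Str.slice q (some (kstar : Int)) = pyRevA r.1 := by
      apply str_toList_inj
      rw [dropS_toList, pyRevA_toList, hdrop]
    have hitAt : (firstIndexDict wc).get? (PySem.Str.slice q (some (kstar : Int))) = some r.2 := by
      rw [hslice, getB_eq_getA wc _ (pyRevA_ne_empty hg.1), pyRevA_pyRevA]
      have hS : ((suffixIndicesA wc).get? r.1).isSome := by
        rw [← PySem.Dict.contains_eq_isSome_get?, PySem.Dict.contains_iff_mem_keys]
        exact hmem
      obtain ⟨v, hv⟩ := Option.isSome_iff_exists.mp hS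
      rw [hv, hval, PySem.Dict.getD_eq_get?_getD, hv]
      rfl
    have noHitBefore : ∀ j : Nat, j < kstar →
        (firstIndexDict wc).get? (PySem.Str.slice q (some (j : Int))) = none := by
      intro j hj
      set t := PySem.Str.slice q (some (j : Int)) with htdef
      by_cases ht : t = ""
      · rw [ht, getB, if_pos rfl]
      · cases hv : (firstIndexDict wc).get? t with
        | none => rfl
        | some v =>
          exfalso
          have htl : t.toList = q.toList.drop j := by rw [htdef, dropS_toList]
          have hGood : GoodKey q.toList (pyRevA t) := by
            refine ⟨pyRevA_ne_empty ht, ?_⟩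
            rw [pyRevA_toList, List.reverse_reverse, htl]
            exact List.drop_suffix _ _
          have hmemK : pyRevA t ∈ (suffixIndicesA wc).keys := by
            rw [← PySem.Dict.contains_iff_mem_keys, PySem.Dict.contains_eq_isSome_get?,
              ← getB_eq_getA wc t ht, hv]
            rfl
          have hle := hmax _ hmemK hGood
          have hlen : (pyRevA t).toList.length = q.toList.length - j := by
            rw [pyRevA_toList, List.length_reverse, htl, List.length_drop]
          omega
    have scanTo : ∀ m k, k ≤ kstar → kstar - k ≤ m →
        suffixScan (firstIndexDict wc) q k = r.2 := by
      intro m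
      induction m with
      | zero =>
        intro k hk1 hk2
        have : k = kstar := by omega
        subst this
        rw [suffixScan, dif_pos hkslt, hitAt]
      | succ m ih =>
        intro k hk1 hk2
        by_cases hke : k = kstar
        · subst hke
          rw [suffixScan, dif_pos hkslt, hitAt]
        · have hklt : k < kstar := by omega
          rw [suffixScan, dif_pos (by omega), noHitBefore k hklt]
          exact ih (k + 1) (by omega) (by omega)
    rw [scanTo kstar 0 (by omega) (by omega)]

-- ===== VERDICT (by name: the statement is the Claim_ definition above) =====
theorem stringIndices_spec : Claim_equal_stringIndices := by
  intro wc wq _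
  unfold Spec_stringIndices stringIndices stringIndices_alt
  simp only [PySem.List.foldl_append_singleton_eq_map, List.nil_append]
  exact List.map_congr_left (fun q _ => perQuery wc q)
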